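-- pv_equiv track=rewrite | github.com/IrynLoza/largest_smaller_than | largest_smaller_than.py | find_largest_smaller_than
-- ===== SOURCE A (Python) =====
-- def find_largest_smaller_than(nums, xnumber):
--     """Find largest number in sorted list that is smaller than given number.
--     [-5, -2, 8, 12, 32], 10"""
--     new = []
--     for num in nums:
--         if num < xnumber:
--             new.append(num)
--
--     if new:
--         target = new[0]
--         for el in new:
--             if el > target:
--                 target = el
--         return new.index(target)
--     else:
--         return True
-- ===== SOURCE B (Python) =====
-- def find_largest_smaller_than(nums, xnumber):
--     """One pass: track the first running-maximum among elements < xnumber,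
--     together with its index within the filtered sequence."""
--     pos = 0
--     best_val = None
--     best_idx = -1
--     for num in nums:
--         if num < xnumber:
--             if best_val is None or num > best_val:
--                 best_val = num
--                 best_idx = pos
--             pos += 1
--     return best_idx
-- ===== Notes on version B (the rewrite author's own statement) =====
-- stated objective: simpler
-- what changed: Replaces A's three passes (build a filtered list, fold for the maximum, list.index scan) by a single pass that tracks the first running maximum among qualifying elements and its filtered position.
-- outside the precondition, e.g. on find_largest_smaller_than([5, 6], 3): A returns True, B returns -1
import Mathlib
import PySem

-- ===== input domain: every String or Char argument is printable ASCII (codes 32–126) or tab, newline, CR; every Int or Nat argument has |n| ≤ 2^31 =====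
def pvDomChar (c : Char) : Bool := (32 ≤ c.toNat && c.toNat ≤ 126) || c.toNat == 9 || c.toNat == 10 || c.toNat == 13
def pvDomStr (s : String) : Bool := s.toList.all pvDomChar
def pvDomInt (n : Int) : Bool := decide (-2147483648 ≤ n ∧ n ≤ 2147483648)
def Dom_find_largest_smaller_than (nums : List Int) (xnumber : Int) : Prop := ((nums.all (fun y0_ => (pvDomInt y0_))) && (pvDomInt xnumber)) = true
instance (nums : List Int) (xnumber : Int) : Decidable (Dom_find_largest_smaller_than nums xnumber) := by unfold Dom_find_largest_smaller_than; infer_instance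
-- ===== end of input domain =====

-- B replaces A's three passes (filter into a new list, fold for its maximum, list.index
-- scan) by a single pass tracking the first running maximum and its filtered position.

-- ===== PORT A =====
def find_largest_smaller_than (nums : List Int) (xnumber : Int) : Int :=
  let new := nums.foldl (fun acc num => if num < xnumber then acc ++ [num] else acc) []
  match new with
  | [] => 1  -- Python returns the bool True here; outside Pre_
  | t0 :: _ =>
    let target := new.foldl (fun t el => if el > t then el else t) t0
    match PySem.List.index? new target with
    | some k => (k : Int)
    | none => 0  -- unreachable: target is an element of new, so .index never raises

-- ===== PORT B =====
def find_largest_smaller_than_alt (nums : List Int) (xnumber : Int) : Int :=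
  (nums.foldl (fun (st : Int × Option Int × Int) num =>
      if num < xnumber then
        match st.2.1 with
        | none => (st.1 + 1, some num, st.1)
        | some b => if num > b then (st.1 + 1, some num, st.1)
                    else (st.1 + 1, some b, st.2.2)
      else st)
    (0, none, -1)).2.2

-- ===== PRECONDITION & SPEC =====
-- Pre_ excludes inputs with no element below xnumber: there A returns the bool True
-- (not an index, not an int); B returns the sentinel -1 there.
def Pre_find_largest_smaller_than (nums : List Int) (xnumber : Int) : Prop :=
  ∃ num ∈ nums, num < xnumber
instance (nums : List Int) (xnumber : Int) : Decidable (Pre_find_largest_smaller_than nums xnumber) := by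
  unfold Pre_find_largest_smaller_than; infer_instance
def pvWitness_find_largest_smaller_than : List Int × Int := ([1], 2)
def Spec_find_largest_smaller_than (nums : List Int) (xnumber : Int) (out : Int) : Prop := out = find_largest_smaller_than_alt nums xnumber
instance (nums : List Int) (xnumber : Int) (out : Int) : Decidable (Spec_find_largest_smaller_than nums xnumber out) := by unfold Spec_find_largest_smaller_than; infer_instance

-- ===== CLAIM (what is proved, stated in full; the proofs are below) =====
def Claim_equal_find_largest_smaller_than : Prop := ∀ (nums : List Int) (xnumber : Int), Dom_find_largest_smaller_than nums xnumber → Pre_find_largest_smaller_than nums xnumber → Spec_find_largest_smaller_than nums xnumber (find_largest_smaller_than nums xnumber)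

-- ===== LEMMAS AND PROOFS =====

-- A's maximum-fold over l started at b
def pvFmax (l : List Int) (b : Int) : Int :=
  l.foldl (fun t el => if el > t then el else t) b

-- B's loop after the first qualifying element: best value b at index i, next position p
def pvRunB (l : List Int) (b i p : Int) : Int :=
  match l with
  | [] => i
  | e :: t => if e > b then pvRunB t e p (p + 1) else pvRunB t b i (p + 1)

-- B's per-element state update (the body of B's loop, unconditional)
def pvStepB (st : Int × Option Int × Int) (num : Int) : Int × Option Int × Int :=
  match st.2.1 with
  | none => (st.1 + 1, some num, st.1)
  | some b => if num > b then (st.1 + 1, some num, st.1)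
              else (st.1 + 1, some b, st.2.2)

theorem pvLe_fmax (l : List Int) (b : Int) : b ≤ pvFmax l b := by
  induction l generalizing b with
  | nil => exact le_refl b
  | cons e t ih =>
    show b ≤ pvFmax t (if e > b then e else b)
    by_cases he : e > b
    · rw [if_pos he]; have := ih (b := e); omega
    · rw [if_neg he]; exact ih b

theorem pvFmax_mem (l : List Int) (b : Int) : pvFmax l b = b ∨ pvFmax l b ∈ l := by
  induction l generalizing b with
  | nil => exact Or.inl rfl
  | cons e t ih =>
    show pvFmax t (if e > b then e else b) = b ∨ pvFmax t (if e > b then e else b) ∈ e :: t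
    by_cases he : e > b
    · rw [if_pos he]
      rcases ih (b := e) with h | h
      · exact Or.inr (by rw [h]; exact List.mem_cons_self)
      · exact Or.inr (List.mem_cons_of_mem e h)
    · rw [if_neg he]
      rcases ih (b := b) with h | h
      · exact Or.inl h
      · exact Or.inr (List.mem_cons_of_mem e h)

theorem pvIndex?_of_mem (l : List Int) (v : Int) (h : v ∈ l) :
    PySem.List.index? l v = some (l.idxOf v) := by
  induction l with
  | nil => simp at h
  | cons a t ih =>
    by_cases hav : a = v
    · subst hav; rw [PySem.List.index?_cons_self]; simp [List.idxOf_cons_self]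
    · have hvt : v ∈ t := by simp at h; tauto
      rw [PySem.List.index?_cons_of_ne t hav, ih hvt]
      simp [List.idxOf_cons_ne t hav]

-- the one-pass loop finds the first index of the overall maximum
theorem pvRunB_eq (l : List Int) (b i p : Int) :
    pvRunB l b i p = if pvFmax l b ≤ b then i else p + (l.idxOf (pvFmax l b) : Int) := by
  induction l generalizing b i p with
  | nil => simp [pvRunB, pvFmax]
  | cons e t ih =>
    have hfx : pvFmax (e :: t) b = pvFmax t (if e > b then e else b) := rfl
    by_cases he : e > b
    · have hlhs : pvRunB (e :: t) b i p = pvRunB t e p (p + 1) := by simp [pvRunB, he]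
      rw [hlhs, ih, hfx]
      have hem : e ≤ pvFmax t e := pvLe_fmax t e
      simp only [if_pos he]
      have hnb : ¬ pvFmax t e ≤ b := by omega
      rw [if_neg hnb]
      by_cases hme : pvFmax t e ≤ e
      · have : pvFmax t e = e := le_antisymm hme hem
        rw [if_pos hme, this, List.idxOf_cons_self]
        simp
      · have hne : e ≠ pvFmax t e := by omega
        rw [if_neg hme, List.idxOf_cons_ne t hne]
        push_cast [Nat.succ_eq_add_one]
        ring
    · have hlhs : pvRunB (e :: t) b i p = pvRunB t b i (p + 1) := by simp [pvRunB, he]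
      rw [hlhs, ih, hfx]
      simp only [if_neg he]
      by_cases hmb : pvFmax t b ≤ b
      · rw [if_pos hmb, if_pos hmb]
      · have hne : e ≠ pvFmax t b := by
          have := pvLe_fmax t b; omega
        rw [if_neg hmb, if_neg hmb, List.idxOf_cons_ne t hne]
        push_cast [Nat.succ_eq_add_one]
        ring

theorem pvFoldB_some (l : List Int) (b i p : Int) :
    (l.foldl pvStepB (p, some b, i)).2.2 = pvRunB l b i p := by
  induction l generalizing b i p with
  | nil => rfl
  | cons e t ih =>
    by_cases he : e > b
    · simp [List.foldl_cons, pvStepB, he, pvRunB, ih]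
    · simp [List.foldl_cons, pvStepB, he, pvRunB, ih]

-- ===== VERDICT (by name: the statement is the Claim_ definition above) =====
theorem find_largest_smaller_than_spec : Claim_equal_find_largest_smaller_than := by
  intro nums x _ hpre
  unfold Spec_find_largest_smaller_than
  -- both sides reduce to the filtered list
  have hfilterA : nums.foldl (fun acc num => if num < x then acc ++ [num] else acc) [] =
      nums.filter (fun n => decide (n < x)) := by
    have := PySem.List.foldl_append_ite_eq_filter (p := fun n : Int => n < x)
      (acc := ([] : List Int)) (l := nums)
    simpa using this
  have hB : find_largest_smaller_than_alt nums x =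
      ((nums.filter (fun n => decide (n < x))).foldl pvStepB (0, none, -1)).2.2 := by
    rw [List.foldl_filter]
    simp only [find_largest_smaller_than_alt, pvStepB, decide_eq_true_eq]
  have hne : nums.filter (fun n => decide (n < x)) ≠ [] := by
    rcases hpre with ⟨v, hv, hlt⟩
    simp [List.filter_eq_nil_iff]
    exact ⟨v, hv, hlt⟩
  obtain ⟨e, t, hf⟩ : ∃ e t, nums.filter (fun n => decide (n < x)) = e :: t := by
    cases hcase : nums.filter (fun n => decide (n < x)) with
    | nil => exact absurd hcase hne
    | cons a l => exact ⟨a, l, rfl⟩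
  -- A's value
  have htarget : (e :: t).foldl (fun tv el => if el > tv then el else tv) e = pvFmax t e := by
    simp [List.foldl_cons, pvFmax]
  have hmem : pvFmax t e ∈ e :: t := by
    rcases pvFmax_mem t e with h | h
    · rw [h]; exact List.mem_cons_self
    · exact List.mem_cons_of_mem e h
  have hA : find_largest_smaller_than nums x = ((e :: t).idxOf (pvFmax t e) : Int) := by
    unfold find_largest_smaller_than
    rw [hfilterA, hf]
    simp only [htarget, pvIndex?_of_mem _ _ hmem]
  -- B's value
  have hB2 : find_largest_smaller_than_alt nums x = pvRunB t e 0 1 := by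
    rw [hB, hf, List.foldl_cons]
    have hstep : pvStepB ((0 : Int), (none : Option Int), (-1 : Int)) e = (1, some e, 0) := rfl
    rw [hstep, pvFoldB_some]
  rw [hA, hB2, pvRunB_eq]
  have hem : e ≤ pvFmax t e := pvLe_fmax t e
  by_cases hme : pvFmax t e ≤ e
  · have : pvFmax t e = e := le_antisymm hme hem
    rw [if_pos hme, this, List.idxOf_cons_self]
    simp
  · have hne' : e ≠ pvFmax t e := by omega
    rw [if_neg hme, List.idxOf_cons_ne t hne']
    push_cast [Nat.succ_eq_add_one]
    ring
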